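-- pv_equiv track=rewrite | github.com/yp/allele-prediction | assign-haplotypes.py | str_src_vect
-- ===== SOURCE A (Python) =====
-- def str_src_vect(src):
--     if not src:
--         return ""
--     prev_c = src[0]
--     result = []
--     for c in src:
--         result.append(" " if prev_c == c else "/")
--         prev_c = c
--     return "".join(result)
-- ===== SOURCE B (Python) =====
-- def str_src_vect(src):
--     # Run-based scan: split src into maximal runs of equal elements; the first
--     # run contributes only spaces, each later run contributes "/" then spaces.
--     if not src:
--         return ""
--     n = len(src)
--     pieces = []
--     i = 0
--     j = 0
--     while j < n and src[j] == src[0]: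
--         j += 1
--     pieces.append(" " * j)
--     i = j
--     while i < n:
--         j = i
--         while j < n and src[j] == src[i]:
--             j += 1
--         pieces.append("/" + " " * (j - i - 1))
--         i = j
--     return "".join(pieces)
-- ===== Notes on version B (the rewrite author's own statement) =====
-- stated objective: alternative
-- what changed: B scans maximal runs of equal elements (groupby-style, emitting one piece per run: spaces for the first run, '/' plus spaces for each later run) instead of A's element-by-element comparison with a prev variable.
import Mathlib
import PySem

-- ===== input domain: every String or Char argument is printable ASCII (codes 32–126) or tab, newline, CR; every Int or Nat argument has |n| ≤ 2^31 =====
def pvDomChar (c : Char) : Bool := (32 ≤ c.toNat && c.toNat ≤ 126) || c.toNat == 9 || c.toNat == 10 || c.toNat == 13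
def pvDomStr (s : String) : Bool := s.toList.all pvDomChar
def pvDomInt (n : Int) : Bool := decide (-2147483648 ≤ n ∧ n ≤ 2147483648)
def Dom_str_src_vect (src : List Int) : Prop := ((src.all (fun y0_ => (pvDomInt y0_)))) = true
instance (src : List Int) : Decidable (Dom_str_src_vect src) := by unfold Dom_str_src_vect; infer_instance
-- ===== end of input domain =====

-- B re-implements A by scanning maximal runs of equal elements (one piece per run)
-- instead of comparing each element with its predecessor; same O(n) cost, different decomposition.

-- ===== PORT A =====
def str_src_vect (src : List Int) : String :=
  match src with
  | [] => ""
  | c0 :: _ =>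
    let st := src.foldl (fun (st : Int × List String) c =>
      (c, st.2 ++ [if st.1 == c then " " else "/"])) (c0, ([] : List String))
    PySem.Str.join "" st.2

-- ===== PORT B =====
-- takeRun c xs = (length of the leading run of elements equal to c, the remainder)
-- (the inner `while j < n and src[j] == src[i]` advance of Source B)
def takeRun (c : Int) : List Int → Nat × List Int
  | [] => (0, [])
  | x :: xs => if x == c then ((takeRun c xs).1 + 1, (takeRun c xs).2) else (0, x :: xs)

theorem takeRun_len : ∀ (xs : List Int) (c : Int), (takeRun c xs).2.length ≤ xs.length := by
  intro xs
  induction xs with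
  | nil => intro c; simp [takeRun]
  | cons x xs ih =>
    intro c
    by_cases h : (x == c) = true
    · simp [takeRun, h]; exact Nat.le_succ_of_le (ih c)
    · simp [takeRun, h]

-- pieces for the runs after the first one: each is "/" followed by (run length - 1) spaces
def altRest : List Int → List String
  | [] => []
  | x :: xs =>
    ("/" ++ String.ofList (List.replicate (takeRun x xs).1 ' ')) :: altRest (takeRun x xs).2
termination_by xs => xs.length
decreasing_by
  simp only [List.length_cons]
  exact Nat.lt_succ_of_le (takeRun_len xs x)

def str_src_vect_alt (src : List Int) : String :=
  match src with
  | [] => ""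
  | x :: xs =>
    PySem.Str.join "" (String.ofList (List.replicate ((takeRun x xs).1 + 1) ' ') :: altRest (takeRun x xs).2)

-- ===== PRECONDITION & SPEC =====
def Spec_str_src_vect (src : List Int) (out : String) : Prop := out = str_src_vect_alt src
instance (src : List Int) (out : String) : Decidable (Spec_str_src_vect src out) := by unfold Spec_str_src_vect; infer_instance

-- ===== CLAIM (what is proved, stated in full; the proofs are below) =====
def Claim_equal_str_src_vect : Prop := ∀ (src : List Int), Dom_str_src_vect src → Spec_str_src_vect src (str_src_vect src)

-- ===== LEMMAS AND PROOFS =====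

-- the list of marks A builds, as a structural recursion
def pairsL (p : Int) : List Int → List String
  | [] => []
  | c :: cs => (if p == c then " " else "/") :: pairsL c cs

theorem foldA (xs : List Int) : ∀ (p : Int) (acc : List String),
    (xs.foldl (fun (st : Int × List String) c =>
      (c, st.2 ++ [if st.1 == c then " " else "/"])) (p, acc)).2 = acc ++ pairsL p xs := by
  induction xs with
  | nil => intro p acc; simp [pairsL]
  | cons x xs ih =>
    intro p acc
    simp only [List.foldl_cons]
    rw [ih]
    simp [pairsL]

theorem join_empty_cons (p : List Char) (rest : List (List Char)) :
    PySem.Chars.join [] (p :: rest) = p ++ PySem.Chars.join [] rest := by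
  cases rest with
  | nil => simp [PySem.Chars.join_singleton, PySem.Chars.join_nil]
  | cons q r => simp [PySem.Chars.join_cons_cons]

theorem toList_join_empty (l : List String) :
    (PySem.Str.join "" l).toList = (l.map String.toList).flatten := by
  rw [PySem.Str.toList_join]
  have h0 : ("" : String).toList = [] := rfl
  rw [h0]
  induction l with
  | nil => simp [PySem.Chars.join_nil]
  | cons p r ih =>
    simp only [List.map_cons, List.flatten_cons]
    rw [join_empty_cons, ih]

theorem altRest_cons (x : Int) (xs : List Int) :
    altRest (x :: xs)
      = ("/" ++ String.ofList (List.replicate (takeRun x xs).1 ' ')) :: altRest (takeRun x xs).2 := by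
  rw [altRest.eq_def]

-- B's pieces flatten to the same character sequence as A's marks, run by run
theorem pairsL_flat (xs : List Int) : ∀ (c : Int),
    ((pairsL c xs).map String.toList).flatten
      = List.replicate (takeRun c xs).1 ' '
        ++ ((altRest (takeRun c xs).2).map String.toList).flatten := by
  induction xs with
  | nil => intro c; simp [pairsL, takeRun, altRest]
  | cons x xs ih =>
    intro c
    by_cases h : (x == c) = true
    · have hcx := eq_of_beq h
      subst hcx
      have ht : takeRun x (x :: xs) = ((takeRun x xs).1 + 1, (takeRun x xs).2) := by
        simp [takeRun]
      rw [ht]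
      simp only [pairsL, beq_self_eq_true, if_true, List.map_cons, List.flatten_cons,
        List.replicate_succ, List.cons_append]
      have hsp : (" " : String).toList = [' '] := rfl
      rw [hsp, ih x]
      rfl
    · have hc : (c == x) = false := by
        apply beq_eq_false_iff_ne.mpr
        intro hcc
        exact (beq_eq_false_iff_ne.mp (by simpa using h)) hcc.symm
      have ht : takeRun c (x :: xs) = (0, x :: xs) := by simp [takeRun, h]
      rw [ht]
      simp only [pairsL, hc, Bool.false_eq_true, if_false, List.map_cons, List.flatten_cons,
        List.replicate_zero, List.nil_append]
      rw [altRest_cons]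
      simp only [List.map_cons, List.flatten_cons]
      have hslash : ("/" ++ String.ofList (List.replicate (takeRun x xs).1 ' ')).toList
          = '/' :: List.replicate (takeRun x xs).1 ' ' := by
        rw [String.toList_append]
        simp
      rw [hslash]
      have hs2 : ("/" : String).toList = ['/'] := rfl
      rw [hs2, ih x]
      simp

-- ===== VERDICT (by name: the statement is the Claim_ definition above) =====
theorem str_src_vect_spec : Claim_equal_str_src_vect := by
  unfold Claim_equal_str_src_vect
  intro src _
  unfold Spec_str_src_vect
  cases src with
  | nil => rfl
  | cons c xs =>
    apply String.ext
    simp only [str_src_vect, str_src_vect_alt]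
    rw [foldA, List.nil_append, toList_join_empty, toList_join_empty]
    simp only [pairsL, beq_self_eq_true, if_true, List.map_cons, List.flatten_cons]
    have h1 : (" " : String).toList = [' '] := rfl
    have h2 : (String.ofList (List.replicate ((takeRun c xs).1 + 1) ' ')).toList
        = ' ' :: List.replicate (takeRun c xs).1 ' ' := by simp [List.replicate_succ]
    rw [h1, h2, pairsL_flat xs c]
    rfl
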